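-- pv_equiv track=rewrite | github.com/imk1/MethylationQTLCode | mergeSortedPosMethylFiles.py | getNextMethylLocation
-- ===== SOURCE A (Python) =====
-- def getNextMethylLocation(currentMethylList, methylFileCompleted):
-- 	# Get the earliest methylation location left in the files
-- 	firstNonCompleted = methylFileCompleted.index(False)
-- 	currentChrom = currentMethylList[firstNonCompleted][0]
-- 	currentPosition = currentMethylList[firstNonCompleted][1]
-- 	currentMethylStateList = [currentMethylList[firstNonCompleted][2]]
-- 	currentMethylFileNumList = [firstNonCompleted]
-- 	for i in range(firstNonCompleted + 1, len(currentMethylList)):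
-- 		# Find the first chromosome and position
-- 		if methylFileCompleted[i] == True:
-- 			# At the end of the current methylation file, so skip it
-- 			continue
-- 		currentMethyl = currentMethylList[i]
-- 		if (currentMethyl[0] < currentChrom) or ((currentMethyl[0] == currentChrom) and  (currentMethyl[1] < currentPosition)):
-- 			# The current location comes before the earliest location so far
-- 			currentChrom = currentMethyl[0]
-- 			currentPosition = currentMethyl[1]
-- 			currentMethylStateList = [currentMethyl[2]]
-- 			currentMethylFileNumList = [i]
-- 		elif (currentMethyl[0] == currentChrom) and  (currentMethyl[1] == currentPosition):
-- 			# Another read with the current methylation status has been found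
-- 			currentMethylStateList.append(currentMethyl[2])
-- 			currentMethylFileNumList.append(i)
-- 	return [currentChrom, currentPosition, currentMethylStateList, currentMethylFileNumList]
-- ===== SOURCE B (Python) =====
-- def getNextMethylLocation(currentMethylList, methylFileCompleted):
-- 	# Two-pass re-implementation: first find the minimal (chrom, position) key over
-- 	# active files with min(), then collect states/file numbers of ties in index order.
-- 	n = len(currentMethylList)
-- 	minKey = min((currentMethylList[i][0], currentMethylList[i][1])
-- 		for i in range(n) if not methylFileCompleted[i])
-- 	stateList = []
-- 	fileNumList = []
-- 	for i in range(n):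
-- 		if not methylFileCompleted[i]:
-- 			m = currentMethylList[i]
-- 			if (m[0], m[1]) == minKey:
-- 				stateList.append(m[2])
-- 				fileNumList.append(i)
-- 	return [minKey[0], minKey[1], stateList, fileNumList]
-- ===== Notes on version B (the rewrite author's own statement) =====
-- stated objective: alternative
-- what changed: Replaces A's single stateful scan (which resets/extends the tie lists while tracking the running minimum) by a two-phase decomposition: compute the minimal (chrom, position) key over active files with min(), then collect the tied states and file indices in a second pass.
import Mathlib
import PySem

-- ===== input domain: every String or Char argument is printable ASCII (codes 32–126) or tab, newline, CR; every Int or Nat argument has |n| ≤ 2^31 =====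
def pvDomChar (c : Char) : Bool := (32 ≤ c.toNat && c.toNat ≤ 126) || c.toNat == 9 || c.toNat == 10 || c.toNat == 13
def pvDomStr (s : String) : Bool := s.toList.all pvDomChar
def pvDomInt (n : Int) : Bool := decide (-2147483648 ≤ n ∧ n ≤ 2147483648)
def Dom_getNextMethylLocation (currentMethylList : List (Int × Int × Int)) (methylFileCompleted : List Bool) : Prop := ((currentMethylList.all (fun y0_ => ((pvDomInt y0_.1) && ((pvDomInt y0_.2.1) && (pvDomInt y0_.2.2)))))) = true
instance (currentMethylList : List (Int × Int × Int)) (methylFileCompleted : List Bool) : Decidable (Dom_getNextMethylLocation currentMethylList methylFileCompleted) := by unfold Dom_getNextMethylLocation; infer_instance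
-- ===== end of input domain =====

-- B replaces A's single stateful min-tracking scan by a two-phase decomposition
-- (min key first, then a second pass collecting ties); objective: alternative, same cost.

-- ===== PORT A =====
-- loop body of A's for-loop, named so the proofs can speak about it
def pvStepA (currentMethylList : List (Int × Int × Int)) (methylFileCompleted : List Bool)
    (st : Int × Int × List Int × List Int) (i : Int) : Int × Int × List Int × List Int :=
  match PySem.List.pyGet? methylFileCompleted i with
  | none => st              -- IndexError: excluded by Pre_
  | some true => st
  | some false =>
    match PySem.List.pyGet? currentMethylList i with
    | none => st            -- IndexError: excluded by Pre_
    | some m =>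
      if m.1 < st.1 ∨ (m.1 = st.1 ∧ m.2.1 < st.2.1) then
        (m.1, m.2.1, [m.2.2], [i])
      else if m.1 = st.1 ∧ m.2.1 = st.2.1 then
        (st.1, st.2.1, st.2.2.1 ++ [m.2.2], st.2.2.2 ++ [i])
      else st

def getNextMethylLocation (currentMethylList : List (Int × Int × Int)) (methylFileCompleted : List Bool) : Int × Int × List Int × List Int :=
  match PySem.List.index? methylFileCompleted false with
  | none => (0, 0, [], [])  -- ValueError from .index: excluded by Pre_
  | some f =>
    match PySem.List.pyGet? currentMethylList (f : Int) with
    | none => (0, 0, [], [])  -- IndexError: excluded by Pre_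
    | some e =>
      (PySem.List.pyRange ((f : Int) + 1) (currentMethylList.length : Int) 1).foldl
        (pvStepA currentMethylList methylFileCompleted)
        (e.1, e.2.1, [e.2.2], [(f : Int)])

-- ===== PORT B =====
-- the running fold of Python's min() over the filtered generator (first minimal kept, tuples lexicographic)
def pvMinStep (currentMethylList : List (Int × Int × Int)) (methylFileCompleted : List Bool)
    (acc : Option (Int × Int)) (i : Int) : Option (Int × Int) :=
  match PySem.List.pyGet? methylFileCompleted i with
  | some false =>
    match PySem.List.pyGet? currentMethylList i with
    | none => acc           -- IndexError: excluded by Pre_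
    | some m =>
      match acc with
      | none => some (m.1, m.2.1)
      | some k => if m.1 < k.1 ∨ (m.1 = k.1 ∧ m.2.1 < k.2) then some (m.1, m.2.1) else some k
  | _ => acc                -- completed file, or IndexError (excluded by Pre_)

-- the body of B's second (collection) pass
def pvSelStep (currentMethylList : List (Int × Int × Int)) (methylFileCompleted : List Bool)
    (k : Int × Int) (acc : List Int × List Int) (i : Int) : List Int × List Int :=
  match PySem.List.pyGet? methylFileCompleted i with
  | some false =>
    match PySem.List.pyGet? currentMethylList i with
    | none => acc           -- IndexError: excluded by Pre_
    | some m => if m.1 = k.1 ∧ m.2.1 = k.2 then (acc.1 ++ [m.2.2], acc.2 ++ [i]) else acc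
  | _ => acc

def getNextMethylLocation_alt (currentMethylList : List (Int × Int × Int)) (methylFileCompleted : List Bool) : Int × Int × List Int × List Int :=
  let n : Int := (currentMethylList.length : Int)
  let minKey := (PySem.List.pyRange 0 n 1).foldl (pvMinStep currentMethylList methylFileCompleted) none
  match minKey with
  | none => (0, 0, [], [])  -- ValueError from empty min(): excluded by Pre_
  | some k =>
    let sf := (PySem.List.pyRange 0 n 1).foldl (pvSelStep currentMethylList methylFileCompleted k) ([], [])
    (k.1, k.2, sf.1, sf.2)

-- ===== PRECONDITION & SPEC =====
-- Pre_ = exactly the inputs where Python A returns: some file is still active (else .index(False)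
-- raises ValueError), its index is inside currentMethylList, and every index the loop visits is
-- inside methylFileCompleted (else IndexError).
def Pre_getNextMethylLocation (currentMethylList : List (Int × Int × Int)) (methylFileCompleted : List Bool) : Prop :=
  let f := (PySem.List.index? methylFileCompleted false).getD methylFileCompleted.length
  f < methylFileCompleted.length ∧ f < currentMethylList.length ∧
    (currentMethylList.length ≤ methylFileCompleted.length ∨ currentMethylList.length ≤ f + 1)
instance (currentMethylList : List (Int × Int × Int)) (methylFileCompleted : List Bool) : Decidable (Pre_getNextMethylLocation currentMethylList methylFileCompleted) := by unfold Pre_getNextMethylLocation; infer_instance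

def pvWitness_getNextMethylLocation : (List (Int × Int × Int)) × List Bool := ([(1, 2, 3), (1, 2, 7)], [false, false])

def Spec_getNextMethylLocation (currentMethylList : List (Int × Int × Int)) (methylFileCompleted : List Bool) (out : Int × Int × List Int × List Int) : Prop := out = getNextMethylLocation_alt currentMethylList methylFileCompleted
instance (currentMethylList : List (Int × Int × Int)) (methylFileCompleted : List Bool) (out : Int × Int × List Int × List Int) : Decidable (Spec_getNextMethylLocation currentMethylList methylFileCompleted out) := by unfold Spec_getNextMethylLocation; infer_instance

-- ===== CLAIM (what is proved, stated in full; the proofs are below) =====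
def Claim_equal_getNextMethylLocation : Prop := ∀ (currentMethylList : List (Int × Int × Int)) (methylFileCompleted : List Bool), Dom_getNextMethylLocation currentMethylList methylFileCompleted → Pre_getNextMethylLocation currentMethylList methylFileCompleted → Spec_getNextMethylLocation currentMethylList methylFileCompleted (getNextMethylLocation currentMethylList methylFileCompleted)

-- ===== LEMMAS AND PROOFS =====

-- the state of A's loop after processing indices f+1 .. j-1
def pvAfold (cml : List (Int × Int × Int)) (mfc : List Bool) (f : Nat) (e : Int × Int × Int)
    (j : Nat) : Int × Int × List Int × List Int :=
  (PySem.List.pyRange ((f : Int) + 1) (j : Int) 1).foldl (pvStepA cml mfc)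
    (e.1, e.2.1, [e.2.2], [(f : Int)])

theorem pv_inert {sigma alpha : Type} (g : sigma → alpha → sigma) (l : List alpha) (acc : sigma)
    (h : ∀ s a, a ∈ l → g s a = s) : l.foldl g acc = acc := by
  induction l generalizing acc with
  | nil => rfl
  | cons x t ih =>
    rw [List.foldl_cons, h _ x (by simp)]
    exact ih _ (fun s a ha => h s a (by simp [ha]))

theorem pv_min_prefix (cml : List (Int × Int × Int)) (mfc : List Bool) (b : Nat)
    (h : ∀ i, i < b → ∀ (him : i < mfc.length), mfc[i] = true) (acc : Option (Int × Int)) :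
    (PySem.List.pyRange 0 (b : Int) 1).foldl (pvMinStep cml mfc) acc = acc := by
  apply pv_inert
  intro s a ha
  obtain ⟨ha0, hab⟩ := (PySem.List.mem_pyRange_one).mp ha
  obtain ⟨i, rfl⟩ : ∃ i : Nat, a = (i : Int) := ⟨a.toNat, (Int.toNat_of_nonneg ha0).symm⟩
  have hib : i < b := by exact_mod_cast hab
  by_cases him : i < mfc.length
  · simp [pvMinStep, List.getElem?_eq_getElem him, h i hib him]
  · simp [pvMinStep, List.getElem?_eq_none (show mfc.length ≤ i by omega)]

theorem pv_sel_prefix (cml : List (Int × Int × Int)) (mfc : List Bool) (k : Int × Int) (b : Nat)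
    (h : ∀ i, i < b → ∀ (him : i < mfc.length), mfc[i] = false →
      ∀ (hic : i < cml.length), ¬((cml[i]).1 = k.1 ∧ (cml[i]).2.1 = k.2))
    (acc : List Int × List Int) :
    (PySem.List.pyRange 0 (b : Int) 1).foldl (pvSelStep cml mfc k) acc = acc := by
  apply pv_inert
  intro s a ha
  obtain ⟨ha0, hab⟩ := (PySem.List.mem_pyRange_one).mp ha
  obtain ⟨i, rfl⟩ : ∃ i : Nat, a = (i : Int) := ⟨a.toNat, (Int.toNat_of_nonneg ha0).symm⟩
  have hib : i < b := by exact_mod_cast hab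
  by_cases him : i < mfc.length
  · cases hmi : mfc[i] with
    | true => simp [pvSelStep, List.getElem?_eq_getElem him, hmi]
    | false =>
      by_cases hic : i < cml.length
      · simp only [pvSelStep, PySem.List.pyGet?_natCast, List.getElem?_eq_getElem him, hmi,
          List.getElem?_eq_getElem hic]
        rw [if_neg (h i hib him hmi hic)]
      · simp [pvSelStep, List.getElem?_eq_getElem him, hmi,
          List.getElem?_eq_none (show cml.length ≤ i by omega)]
  · simp [pvSelStep, List.getElem?_eq_none (show mfc.length ≤ i by omega)]

-- main loop invariant: after processing indices below j, B's min-fold over [0, j) yields A's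
-- running key, B's collection fold (at that key) yields A's tie lists, and A's running key is a
-- lexicographic lower bound of every active key seen so far
theorem pv_inv (cml : List (Int × Int × Int)) (mfc : List Bool) (f : Nat)
    (hfm : f < mfc.length) (hmf : mfc[f] = false) (hprev : ∀ j, j < f → ∀ (hj : j < mfc.length), mfc[j] = true)
    (hfc : f < cml.length) (e : Int × Int × Int) (he : cml[f] = e)
    (hlen : cml.length ≤ mfc.length ∨ cml.length ≤ f + 1) :
    ∀ j : Nat, f + 1 ≤ j → j ≤ cml.length →
      (PySem.List.pyRange 0 (j : Int) 1).foldl (pvMinStep cml mfc) none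
          = some ((pvAfold cml mfc f e j).1, (pvAfold cml mfc f e j).2.1) ∧
      (PySem.List.pyRange 0 (j : Int) 1).foldl
          (pvSelStep cml mfc ((pvAfold cml mfc f e j).1, (pvAfold cml mfc f e j).2.1)) ([], [])
          = ((pvAfold cml mfc f e j).2.2.1, (pvAfold cml mfc f e j).2.2.2) ∧
      (∀ i : Nat, i < j → ∀ (him : i < mfc.length), mfc[i] = false → ∀ (hic : i < cml.length),
        ¬((cml[i]).1 < (pvAfold cml mfc f e j).1 ∨
          ((cml[i]).1 = (pvAfold cml mfc f e j).1 ∧ (cml[i]).2.1 < (pvAfold cml mfc f e j).2.1))) := by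
  intro j hj
  induction j, hj using Nat.le_induction with
  | base =>
    intro _
    have hst : pvAfold cml mfc f e (f + 1) = (e.1, e.2.1, [e.2.2], [(f : Int)]) := by
      unfold pvAfold
      rw [PySem.List.pyRange_one_eq_nil (by push_cast; omega)]
      rfl
    rw [hst]
    have hsplit : PySem.List.pyRange 0 ((f + 1 : Nat) : Int) 1
        = PySem.List.pyRange 0 (f : Int) 1 ++ [(f : Int)] := by
      push_cast
      exact PySem.List.pyRange_one_succ_right (by positivity)
    refine ⟨?_, ?_, ?_⟩
    · rw [hsplit, List.foldl_append, pv_min_prefix cml mfc f (fun i hi him => hprev i hi him)]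
      simp [pvMinStep, List.getElem?_eq_getElem hfm, hmf, List.getElem?_eq_getElem hfc, he]
    · rw [hsplit, List.foldl_append, pv_sel_prefix cml mfc _ f
        (fun i hi him hfalse hic => by rw [hprev i hi him] at hfalse; exact absurd hfalse (by simp))]
      simp [pvSelStep, List.getElem?_eq_getElem hfm, hmf, List.getElem?_eq_getElem hfc, he]
    · intro i hi him hfalse hic
      rcases Nat.lt_succ_iff_lt_or_eq.mp hi with hlt | rfl
      · rw [hprev i hlt him] at hfalse; exact absurd hfalse (by simp)
      · have hgen : ∀ x : Int × Int × Int, x = e →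
            ¬(x.1 < e.1 ∨ (x.1 = e.1 ∧ x.2.1 < e.2.1)) := by rintro x rfl; omega
        exact hgen cml[i] he
  | succ n hn ih =>
    intro hn1
    obtain ⟨h1, h2, h3⟩ := ih (by omega)
    have hnc : n < cml.length := by omega
    have hnm : n < mfc.length := by omega
    have hsplitA : pvAfold cml mfc f e (n + 1)
        = pvStepA cml mfc (pvAfold cml mfc f e n) (n : Int) := by
      unfold pvAfold
      have : PySem.List.pyRange ((f : Int) + 1) ((n + 1 : Nat) : Int) 1
          = PySem.List.pyRange ((f : Int) + 1) (n : Int) 1 ++ [(n : Int)] := by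
        push_cast
        exact PySem.List.pyRange_one_succ_right (by omega)
      rw [this, List.foldl_append, List.foldl_cons, List.foldl_nil]
    have hsplitB : ∀ {sigma : Type} (g : sigma → Int → sigma) (acc : sigma),
        (PySem.List.pyRange 0 ((n + 1 : Nat) : Int) 1).foldl g acc
          = g ((PySem.List.pyRange 0 (n : Int) 1).foldl g acc) (n : Int) := by
      intro sigma g acc
      have : PySem.List.pyRange 0 ((n + 1 : Nat) : Int) 1
          = PySem.List.pyRange 0 (n : Int) 1 ++ [(n : Int)] := by
        push_cast
        exact PySem.List.pyRange_one_succ_right (by positivity)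
      rw [this, List.foldl_append, List.foldl_cons, List.foldl_nil]
    rcases hstn : pvAfold cml mfc f e n with ⟨c, p, S, F⟩
    rw [hstn] at h1 h2 h3
    simp only at h1 h2 h3
    cases hb : mfc[n] with
    | true =>
      have hstep : pvAfold cml mfc f e (n + 1) = (c, p, S, F) := by
        rw [hsplitA, hstn]
        simp [pvStepA, List.getElem?_eq_getElem hnm, hb]
      rw [hstep]
      refine ⟨?_, ?_, ?_⟩
      · rw [hsplitB, h1]
        simp [pvMinStep, List.getElem?_eq_getElem hnm, hb]
      · rw [hsplitB, h2]
        simp [pvSelStep, List.getElem?_eq_getElem hnm, hb]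
      · intro i hi him hfalse hic
        rcases Nat.lt_succ_iff_lt_or_eq.mp hi with hlt | rfl
        · exact h3 i hlt him hfalse hic
        · rw [hb] at hfalse; exact absurd hfalse (by simp)
    | false =>
      have hgetm : PySem.List.pyGet? mfc (n : Int) = some false := by
        rw [PySem.List.pyGet?_natCast, List.getElem?_eq_getElem hnm, hb]
      have hgetc : PySem.List.pyGet? cml (n : Int) = some cml[n] := by
        rw [PySem.List.pyGet?_natCast, List.getElem?_eq_getElem hnc]
      by_cases hlt : (cml[n]).1 < c ∨ ((cml[n]).1 = c ∧ (cml[n]).2.1 < p)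
      · -- strictly smaller key: A resets, B's min replaces, B's collection restarts
        have hstep : pvAfold cml mfc f e (n + 1)
            = ((cml[n]).1, (cml[n]).2.1, [(cml[n]).2.2], [(n : Int)]) := by
          rw [hsplitA, hstn]
          simp only [pvStepA, hgetm, hgetc]
          rw [if_pos hlt]
        rw [hstep]
        refine ⟨?_, ?_, ?_⟩
        · rw [hsplitB, h1]
          simp only [pvMinStep, hgetm, hgetc]
          rw [if_pos hlt]
        · have hpre0 : (PySem.List.pyRange 0 (n : Int) 1).foldl
              (pvSelStep cml mfc ((cml[n]).1, (cml[n]).2.1)) ([], []) = ([], []) := by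
            apply pv_sel_prefix
            intro i hi him hfalse hic
            have := h3 i hi him hfalse hic
            simp only at this ⊢
            omega
          rw [hsplitB, hpre0]
          simp [pvSelStep, hgetm, hgetc]
        · intro i hi him hfalse hic
          simp only
          rcases Nat.lt_succ_iff_lt_or_eq.mp hi with hlti | rfl
          · have := h3 i hlti him hfalse hic
            omega
          · omega
      · by_cases heq : (cml[n]).1 = c ∧ (cml[n]).2.1 = p
        · -- tie: A appends, B's min keeps, B's collection appends
          have hstep : pvAfold cml mfc f e (n + 1)
              = (c, p, S ++ [(cml[n]).2.2], F ++ [(n : Int)]) := by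
            rw [hsplitA, hstn]
            simp only [pvStepA, hgetm, hgetc]
            rw [if_neg hlt, if_pos heq]
          rw [hstep]
          refine ⟨?_, ?_, ?_⟩
          · rw [hsplitB, h1]
            simp only [pvMinStep, hgetm, hgetc]
            rw [if_neg hlt]
          · rw [hsplitB, h2]
            simp only [pvSelStep, hgetm, hgetc]
            rw [if_pos heq]
          · intro i hi him hfalse hic
            simp only
            rcases Nat.lt_succ_iff_lt_or_eq.mp hi with hlti | rfl
            · exact h3 i hlti him hfalse hic
            · exact hlt
        · -- strictly larger key: everything unchanged
          have hstep : pvAfold cml mfc f e (n + 1) = (c, p, S, F) := by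
            rw [hsplitA, hstn]
            simp only [pvStepA, hgetm, hgetc]
            rw [if_neg hlt, if_neg heq]
          rw [hstep]
          refine ⟨?_, ?_, ?_⟩
          · rw [hsplitB, h1]
            simp only [pvMinStep, hgetm, hgetc]
            rw [if_neg hlt]
          · rw [hsplitB, h2]
            simp only [pvSelStep, hgetm, hgetc]
            rw [if_neg heq]
          · intro i hi him hfalse hic
            simp only
            rcases Nat.lt_succ_iff_lt_or_eq.mp hi with hlti | rfl
            · exact h3 i hlti him hfalse hic
            · exact hlt

-- ===== VERDICT (by name: the statement is the Claim_ definition above) =====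
theorem getNextMethylLocation_spec : Claim_equal_getNextMethylLocation := by
  intro cml mfc _hdom hpre
  obtain ⟨hflt, hfc', hlen⟩ := hpre
  obtain ⟨f, hf⟩ : ∃ f, PySem.List.index? mfc false = some f := by
    cases h : PySem.List.index? mfc false with
    | none => rw [h] at hflt; simp at hflt
    | some f => exact ⟨f, rfl⟩
  rw [hf] at hflt hfc' hlen
  simp only [Option.getD_some] at hflt hfc' hlen
  obtain ⟨hfm, hmf, hprev'⟩ := PySem.List.getElem_of_index?_eq_some hf
  have hprev : ∀ j, j < f → ∀ (hj : j < mfc.length), mfc[j] = true := by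
    intro j hj hjm
    have := hprev' j hj
    cases hb : mfc[j] with
    | true => rfl
    | false => exact absurd hb this
  obtain ⟨h1, h2, h3⟩ := pv_inv cml mfc f hfm hmf hprev hfc' cml[f] rfl hlen
    cml.length (by omega) (le_refl _)
  show getNextMethylLocation cml mfc = getNextMethylLocation_alt cml mfc
  have hA : getNextMethylLocation cml mfc = pvAfold cml mfc f cml[f] cml.length := by
    simp only [getNextMethylLocation, hf, PySem.List.pyGet?_natCast,
      List.getElem?_eq_getElem hfc', pvAfold]
  have hB : getNextMethylLocation_alt cml mfc
      = ((pvAfold cml mfc f cml[f] cml.length).1, (pvAfold cml mfc f cml[f] cml.length).2.1,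
         (pvAfold cml mfc f cml[f] cml.length).2.2.1, (pvAfold cml mfc f cml[f] cml.length).2.2.2) := by
    simp only [getNextMethylLocation_alt, h1, h2]
  rw [hA, hB]
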